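-- pv_equiv track=rewrite | github.com/hklang/vercel-test | caipiao/verify_methods.py | predict_012
-- ===== SOURCE A (Python) =====
-- from collections import Counter
--
-- def predict_012(history_data):
--     """012路：按除3余数选号"""
--     all_nums = []
--     for item in history_data[:20]:
--         all_nums.extend(item['basic_numbers'])
--     counter = Counter(all_nums)
--     road0 = [str(n).zfill(2) for n, c in counter.most_common(20) if int(n) % 3 == 0][:2]
--     road1 = [str(n).zfill(2) for n, c in counter.most_common(20) if int(n) % 3 == 1][:3]
--     road2 = [str(n).zfill(2) for n, c in counter.most_common(20) if int(n) % 3 == 2][:2]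
--     return road0 + road1 + road2
-- ===== SOURCE B (Python) =====
-- def predict_012(history_data):
--     """012路：按除3余数选号 — selection instead of sorting: repeatedly extract the
--     currently most-frequent number and route it straight into its mod-3 bucket."""
--     counts = {}
--     for item in history_data[:20]:
--         for n in item['basic_numbers']:
--             counts[n] = counts.get(n, 0) + 1
--     items = list(counts.items())
--     roads = ([], [], [])
--     caps = (2, 3, 2)
--     for _ in range(min(20, len(items))):
--         best = max(items, key=lambda p: p[1])
--         items.remove(best)
--         n = best[0]
--         if len(roads[n % 3]) < caps[n % 3]:
--             roads[n % 3].append(str(n).zfill(2))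
--     return roads[0] + roads[1] + roads[2]
-- ===== Notes on version B (the rewrite author's own statement) =====
-- stated objective: alternative
-- what changed: B never builds the sorted top-20 ranking: it counts with a plain dict (get/+1 instead of Counter/most_common) and then runs a selection loop - up to 20 rounds of 'take the first currently-most-frequent entry with max(key=count), remove it from the pool, and route it immediately into its mod-3 bucket under the 2/3/2 caps' - where A sorts the counter once and scans the ranking with three filtered comprehensions.
import Mathlib
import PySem

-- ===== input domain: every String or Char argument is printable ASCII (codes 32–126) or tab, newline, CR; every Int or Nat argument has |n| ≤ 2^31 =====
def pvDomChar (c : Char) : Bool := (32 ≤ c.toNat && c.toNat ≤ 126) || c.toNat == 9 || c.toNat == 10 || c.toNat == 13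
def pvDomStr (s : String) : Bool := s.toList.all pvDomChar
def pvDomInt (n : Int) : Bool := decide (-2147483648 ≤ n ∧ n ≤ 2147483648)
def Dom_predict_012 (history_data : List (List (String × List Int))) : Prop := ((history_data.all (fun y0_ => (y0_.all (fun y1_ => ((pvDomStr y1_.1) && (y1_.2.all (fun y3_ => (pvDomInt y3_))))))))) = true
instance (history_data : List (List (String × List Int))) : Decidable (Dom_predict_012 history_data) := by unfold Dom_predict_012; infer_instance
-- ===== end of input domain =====

-- B ranks by SELECTION — it repeatedly extracts the currently most-frequent number (Python max +
-- remove, no sort) and routes it straight into its mod-3 bucket — instead of A's sorted ranking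
-- scanned three times; equivalence is about the return value (neither program mutates its argument).

-- ===== PORT A =====
-- str(n).zfill(2) applied to a ranked counter entry
def pvLabel (p : Int × Int) : String := PySem.Str.zfill (PySem.Int.toStr p.1) 2

-- item['basic_numbers'] is ported with Dict.getD; Pre_ guarantees the key is present (Python raises KeyError otherwise).
def predict_012 (history_data : List (List (String × List Int))) : List String :=
  let all_nums : List Int :=
    (PySem.List.slice history_data none (some 20)).foldl
      (fun acc item => acc ++ (PySem.Dict.ofList item).getD "basic_numbers" []) []
  let counter := PySem.Dict.counter all_nums
  -- counter.most_common(20) = sorted(items, key=count, reverse=True)[:20] (stable)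
  let road0 :=
    ((((PySem.List.sorted counter.items (fun p => p.2) true).take 20).filter
      (fun p => PySem.Int.mod p.1 3 = 0)).map pvLabel).take 2
  let road1 :=
    ((((PySem.List.sorted counter.items (fun p => p.2) true).take 20).filter
      (fun p => PySem.Int.mod p.1 3 = 1)).map pvLabel).take 3
  let road2 :=
    ((((PySem.List.sorted counter.items (fun p => p.2) true).take 20).filter
      (fun p => PySem.Int.mod p.1 3 = 2)).map pvLabel).take 2
  road0 ++ road1 ++ road2

-- ===== PORT B =====
-- route one extracted entry into the bucket of n % 3 if that bucket is under its cap (2/3/2)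
def pvRoute (s : List String × List String × List String) (p : Int × Int) :
    List String × List String × List String :=
  let e := pvLabel p
  let r := PySem.Int.mod p.1 3
  if r = 0 then (if s.1.length < 2 then (s.1 ++ [e], s.2.1, s.2.2) else s)
  else if r = 1 then (if s.2.1.length < 3 then (s.1, s.2.1 ++ [e], s.2.2) else s)
  else (if s.2.2.length < 2 then (s.1, s.2.1, s.2.2 ++ [e]) else s)

-- B's selection loop: 'for _ in range(min(20, len(items))): best = max(items, key=count);
-- items.remove(best); route best'.  max(…, key) = PySem.List.max? (first maximal element);
-- items.remove(best) removes the first occurrence of best, which (best ∈ items) is List.erase;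
-- the loop count is the fuel, so the none branch is unreachable (a totalising guard only).
def pvSelect (k : Nat) (items : List (Int × Int))
    (s : List String × List String × List String) :
    List String × List String × List String :=
  match k with
  | 0 => s
  | k + 1 =>
    match PySem.List.max? items (fun p => p.2) with
    | none => s
    | some best => pvSelect k (items.erase best) (pvRoute s best)

def predict_012_alt (history_data : List (List (String × List Int))) : List String :=
  -- counts[n] = counts.get(n, 0) + 1 over the numbers of the first 20 rows
  let counts : PySem.Dict Int Int :=
    (PySem.List.slice history_data none (some 20)).foldl
      (fun d item => ((PySem.Dict.ofList item).getD "basic_numbers" []).foldl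
        (fun d n => d.insert n (d.getD n 0 + 1)) d)
      PySem.Dict.empty
  let items := counts.items
  let st := pvSelect (min 20 items.length) items ([], [], [])
  st.1 ++ st.2.1 ++ st.2.2

-- ===== PRECONDITION & SPEC =====
-- Pre_ excludes exactly the inputs on which Python A raises KeyError: a row among the
-- first 20 lacking the key 'basic_numbers' (B raises there too).
def Pre_predict_012 (history_data : List (List (String × List Int))) : Prop :=
  ∀ item ∈ PySem.List.slice history_data none (some 20),
    (PySem.Dict.ofList item).contains "basic_numbers" = true
instance (history_data : List (List (String × List Int))) : Decidable (Pre_predict_012 history_data) := by unfold Pre_predict_012; infer_instance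
def pvWitness_predict_012 : (List (List (String × List Int))) := [[("basic_numbers", [1, 2, 3, 3])]]
def Spec_predict_012 (history_data : List (List (String × List Int))) (out : List String) : Prop := out = predict_012_alt history_data
instance (history_data : List (List (String × List Int))) (out : List String) : Decidable (Spec_predict_012 history_data out) := by unfold Spec_predict_012; infer_instance

-- ===== CLAIM (what is proved, stated in full; the proofs are below) =====
def Claim_equal_predict_012 : Prop := ∀ (history_data : List (List (String × List Int))), Dom_predict_012 history_data → Pre_predict_012 history_data → Spec_predict_012 history_data (predict_012 history_data)

-- ===== LEMMAS AND PROOFS =====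

-- max over a snoc is one fold step on max over the prefix
theorem max?_snoc (l : List (Int × Int)) (x : Int × Int) :
    PySem.List.max? (l ++ [x]) (fun p => p.2)
    = match PySem.List.max? l (fun p => p.2) with
      | none => some x
      | some m => if m.2 < x.2 then some x else some m := by
  cases hml : PySem.List.max? l (fun p => p.2) with
  | none =>
    unfold PySem.List.max? at hml ⊢
    rw [List.foldl_append, hml]
    rfl
  | some mt =>
    unfold PySem.List.max? at hml ⊢
    rw [List.foldl_append, hml]
    rfl

-- sorted over a snoc is one insertion into sorted over the prefix
theorem sorted_snoc (l : List (Int × Int)) (x : Int × Int) :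
    PySem.List.sorted (l ++ [x]) (fun p => p.2) true
    = PySem.List.insertBy (fun a b => decide (b.2 < a.2)) x
        (PySem.List.sorted l (fun p => p.2) true) := by
  simp [PySem.List.sorted, List.foldl_append]

-- SELECTION = STABLE SORT: on a duplicate-free list the stable descending sort is the first
-- maximal element followed by the stable descending sort of the list with it removed.
theorem sorted_rev_max_cons (l : List (Int × Int)) (hnd : l.Nodup) :
    ∀ m : Int × Int, PySem.List.max? l (fun p => p.2) = some m →
    PySem.List.sorted l (fun p => p.2) true
    = m :: PySem.List.sorted (l.erase m) (fun p => p.2) true := by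
  induction l using List.reverseRecOn with
  | nil => intro m hm; simp [PySem.List.max?] at hm
  | append_singleton t x ih =>
    intro m hm
    rw [max?_snoc] at hm
    cases ht : PySem.List.max? t (fun p => p.2) with
    | none =>
      have : t = [] := (PySem.List.max?_eq_none_iff _ _).1 ht
      subst this
      rw [ht] at hm
      simp at hm
      subst hm
      simp [PySem.List.sorted, PySem.List.insertBy]
    | some mt =>
      rw [ht] at hm
      have hmem : mt ∈ t := PySem.List.max?_mem ht
      have hndt : t.Nodup := hnd.of_append_left
      by_cases hlt : mt.2 < x.2
      · simp only [hlt, if_true, Option.some.injEq] at hm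
        subst hm
        have hxnot : x ∉ t := by
          intro hx
          exact (List.disjoint_of_nodup_append hnd) hx (by simp)
        rw [List.erase_append_right _ hxnot]
        simp only [List.erase_cons_head, List.append_nil]
        rw [sorted_snoc, ih hndt mt ht]
        simp [PySem.List.insertBy, hlt]
      · simp only [hlt, if_false, Option.some.injEq] at hm
        subst hm
        rw [List.erase_append_left _ hmem, sorted_snoc, sorted_snoc, ih hndt mt ht]
        simp [PySem.List.insertBy, hlt]

-- B's selection loop computes the bucket-routing fold over the first k entries of the sorted ranking
theorem pvSelect_eq (k : Nat) (items : List (Int × Int)) (hnd : items.Nodup)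
    (s : List String × List String × List String) :
    pvSelect k items s
    = ((PySem.List.sorted items (fun p => p.2) true).take k).foldl pvRoute s := by
  induction k generalizing items s with
  | zero => simp [pvSelect]
  | succ k ih =>
    cases hm : PySem.List.max? items (fun p => p.2) with
    | none =>
      have : items = [] := (PySem.List.max?_eq_none_iff _ _).1 hm
      subst this
      simp [pvSelect, hm, PySem.List.sorted]
    | some best =>
      have hstep : pvSelect (k + 1) items s = pvSelect k (items.erase best) (pvRoute s best) := by
        simp [pvSelect, hm]
      rw [hstep, ih _ (hnd.erase best), sorted_rev_max_cons items hnd best hm,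
        List.take_succ_cons, List.foldl_cons]

-- bucket-fold invariant: the capped routing fold equals the three capped filtered projections
theorem bucket_fold (l : List (Int × Int)) (a b c : List String) :
    l.foldl pvRoute (a, b, c)
    = (a ++ (((l.filter (fun p => PySem.Int.mod p.1 3 = 0)).map pvLabel).take (2 - a.length)),
       b ++ (((l.filter (fun p => PySem.Int.mod p.1 3 = 1)).map pvLabel).take (3 - b.length)),
       c ++ (((l.filter (fun p => PySem.Int.mod p.1 3 = 2)).map pvLabel).take (2 - c.length))) := by
  induction l generalizing a b c with
  | nil => simp
  | cons x l ih =>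
    have h0 : (0:Int) ≤ PySem.Int.mod x.1 3 := PySem.Int.mod_nonneg _ (by norm_num)
    have h3 : PySem.Int.mod x.1 3 < 3 := PySem.Int.mod_lt _ (by norm_num)
    rcases (by omega : PySem.Int.mod x.1 3 = 0 ∨ PySem.Int.mod x.1 3 = 1 ∨ PySem.Int.mod x.1 3 = 2) with h | h | h
    · simp only [List.foldl_cons, pvRoute, h, List.filter_cons, decide_eq_true_eq]
      simp only [if_true]
      by_cases hl : a.length < 2
      · rw [if_pos hl, ih, List.map_cons,
            (by omega : 2 - a.length = (2 - (a.length + 1)) + 1), List.take_succ_cons]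
        simp
      · rw [if_neg hl, ih]
        simp [(by omega : 2 - a.length = 0)]
    · simp only [List.foldl_cons, pvRoute, h, List.filter_cons, decide_eq_true_eq]
      simp only [if_true]
      by_cases hl : b.length < 3
      · rw [if_pos hl, ih, List.map_cons,
            (by omega : 3 - b.length = (3 - (b.length + 1)) + 1), List.take_succ_cons]
        simp
      · rw [if_neg hl, ih]
        simp [(by omega : 3 - b.length = 0)]
    · simp only [List.foldl_cons, pvRoute, h, List.filter_cons, decide_eq_true_eq]
      simp only [if_true]
      by_cases hl : c.length < 2
      · rw [if_pos hl, ih, List.map_cons,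
            (by omega : 2 - c.length = (2 - (c.length + 1)) + 1), List.take_succ_cons]
        simp
      · rw [if_neg hl, ih]
        simp [(by omega : 2 - c.length = 0)]

-- ===== VERDICT (by name: the statement is the Claim_ definition above) =====
theorem predict_012_spec : Claim_equal_predict_012 := by
  intro h _ _
  unfold Spec_predict_012 predict_012 predict_012_alt
  simp only [PySem.List.foldl_append_eq_flatMap, List.nil_append, ← List.foldl_flatMap,
    PySem.Dict.foldl_insert_getD_add_one_eq_counter]
  set xs := (PySem.List.slice h none (some 20)).flatMap
    (fun item => (PySem.Dict.ofList item).getD "basic_numbers" []) with hxs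
  have hnd : (PySem.Dict.counter xs).items.Nodup := by
    rw [PySem.Dict.items_counter]
    exact (PySem.Set.nodup_ofList xs).map (fun a b hab => congrArg Prod.fst hab)
  rw [pvSelect_eq _ _ hnd]
  have hlen : (PySem.List.sorted (PySem.Dict.counter xs).items (fun p => p.2) true).length
      = (PySem.Dict.counter xs).items.length := PySem.List.length_sorted _ _ _
  rw [show ((PySem.List.sorted (PySem.Dict.counter xs).items (fun p => p.2) true).take
        (min 20 (PySem.Dict.counter xs).items.length))
      = (PySem.List.sorted (PySem.Dict.counter xs).items (fun p => p.2) true).take 20 by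
    rw [← hlen, ← List.take_take, List.take_length]]
  rw [bucket_fold]
  simp
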